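-- pv_equiv track=rewrite | github.com/Disha-Kumar/srm_coding_round_template | q1.py | first_stable_character
-- ===== SOURCE A (Python) =====
-- def first_stable_character(s: str):
--     if not s:
--         return None
--
--     freq = {}
--     for ch in s:
--         freq[ch] = freq.get(ch, 0) + 1
--
--     i = 0
--     n = len(s)
--
--     while i < n:
--         current_char = s[i]
--         block_length = 0
--
--         while i + block_length < n and s[i + block_length] == current_char:
--             block_length += 1
--
--         if freq[current_char] == block_length:
--             return current_char
--
--         i += block_length
--
--     return None
-- ===== SOURCE B (Python) =====
-- def first_stable_character(s: str):
--     chars = list(s)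
--     rev = chars[::-1]
--     n = len(chars)
--     for ch in dict.fromkeys(chars):
--         first = chars.index(ch)
--         last = n - 1 - rev.index(ch)
--         if last - first + 1 == chars.count(ch):
--             return ch
--     return None
-- ===== Notes on version B (the rewrite author's own statement) =====
-- stated objective: simpler
-- what changed: Replaces the frequency dict plus nested block-walking while loops by a positional-extent test: for each distinct character in first-appearance order (dict.fromkeys), it is stable iff last_index - first_index + 1 == count.
import Mathlib
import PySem

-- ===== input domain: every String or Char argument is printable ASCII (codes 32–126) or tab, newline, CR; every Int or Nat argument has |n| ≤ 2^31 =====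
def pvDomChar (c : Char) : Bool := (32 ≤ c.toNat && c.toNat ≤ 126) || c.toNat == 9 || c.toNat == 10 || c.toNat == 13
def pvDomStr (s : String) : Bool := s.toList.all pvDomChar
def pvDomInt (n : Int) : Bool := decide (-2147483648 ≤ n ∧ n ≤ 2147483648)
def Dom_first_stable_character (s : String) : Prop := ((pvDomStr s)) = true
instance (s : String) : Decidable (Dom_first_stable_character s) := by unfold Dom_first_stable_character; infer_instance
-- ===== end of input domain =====

-- B replaces A's frequency dict + nested block-walking while loops by a positional-extent
-- test (last - first + 1 == count) per character, in scan order; objective: simpler.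

-- ===== PORT A =====
-- inner while loop of A: length of the run of `c` at the front of the suffix
def pvBlockLen (c : Char) : List Char → Nat
  | [] => 0
  | x :: xs => if x = c then pvBlockLen c xs + 1 else 0

-- outer while loop of A over the suffix of the string starting at index i;
-- freq[current_char] is always present (current_char ∈ s), so `getD` is exact here
def pvLoopA (freq : PySem.Dict Char Int) (t : List Char) : Option Char :=
  match t with
  | [] => none
  | c :: rest =>
    let b := pvBlockLen c (c :: rest)
    if freq.getD c 0 = (b : Int) then some c
    else pvLoopA freq ((c :: rest).drop b)
termination_by t.length
decreasing_by simp [pvBlockLen]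

def first_stable_character (s : String) : Option String :=
  if s.toList.isEmpty then none
  else
    let freq := s.toList.foldl (fun d ch => d.insert ch (d.getD ch 0 + 1)) PySem.Dict.empty
    (pvLoopA freq s.toList).map (fun c => String.ofList [c])

-- ===== PORT B =====
-- loop body of B: last - first + 1 == count; chars.index/rev.index never raise here
-- (ch ∈ chars), so the catch-all `false` branch is unreachable
def pvStable (chars rev : List Char) (n : Nat) (c : Char) : Bool :=
  match PySem.List.index? chars c, PySem.List.index? rev c with
  | some f, some r => ((n : Int) - 1 - (r : Int) - (f : Int) + 1 == (chars.count c : Int))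
  | _, _ => false

-- rev := chars[::-1] is chars.reverse (PySem.List.slice?_none_none_neg_one);
-- dict.fromkeys(chars) is PySem.List.dedup chars
def first_stable_character_alt (s : String) : Option String :=
  let chars := s.toList
  let rev := chars.reverse
  let n := chars.length
  ((PySem.List.dedup chars).find? (pvStable chars rev n)).map (fun c => String.ofList [c])

-- ===== PRECONDITION & SPEC =====
def Spec_first_stable_character (s : String) (out : Option String) : Prop := out = first_stable_character_alt s
instance (s : String) (out : Option String) : Decidable (Spec_first_stable_character s out) := by unfold Spec_first_stable_character; infer_instance

-- ===== CLAIM (what is proved, stated in full; the proofs are below) =====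
def Claim_equal_first_stable_character : Prop := ∀ (s : String), Dom_first_stable_character s → Spec_first_stable_character s (first_stable_character s)

-- ===== LEMMAS AND PROOFS =====

theorem pvBlockLen_take (c : Char) (t : List Char) :
    t.take (pvBlockLen c t) = List.replicate (pvBlockLen c t) c := by
  induction t with
  | nil => simp [pvBlockLen]
  | cons x xs ih =>
    by_cases h : x = c
    · subst h; simp [pvBlockLen, List.replicate_succ, ih]
    · simp [pvBlockLen, h]

theorem pvBlockLen_drop_head (c d : Char) (t : List Char)
    (h : (t.drop (pvBlockLen c t)).head? = some d) : d ≠ c := by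
  induction t with
  | nil => simp [pvBlockLen] at h
  | cons x xs ih =>
    by_cases hx : x = c
    · subst hx
      simp only [pvBlockLen] at h
      exact ih h
    · simp [pvBlockLen, hx] at h; subst h; exact hx

theorem pvBlockLen_le (c : Char) (t : List Char) : pvBlockLen c t ≤ t.length := by
  induction t with
  | nil => simp [pvBlockLen]
  | cons x xs ih =>
    by_cases h : x = c <;> simp [pvBlockLen, h]
    omega

-- first index of c in u ++ replicate b c ++ v is u.length, when c ∉ u and 1 ≤ b
theorem pv_index?_mid (u v : List Char) (c : Char) (b : Nat) (hb : 1 ≤ b) (hu : c ∉ u) :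
    PySem.List.index? (u ++ (List.replicate b c ++ v)) c = some u.length := by
  induction u with
  | nil =>
    obtain ⟨b', rfl⟩ : ∃ b', b = b' + 1 := ⟨b - 1, by omega⟩
    rw [List.nil_append, List.replicate_succ]
    exact PySem.List.index?_cons_self _ _
  | cons x u' ih =>
    have hx : x ≠ c := fun h => hu (h ▸ List.mem_cons_self)
    have := PySem.List.index?_cons_of_ne (xs := u' ++ (List.replicate b c ++ v)) (v := c) hx
    rw [List.cons_append, this, ih (fun h => hu (List.mem_cons_of_mem _ h))]
    rfl

theorem pv_find?_block_pos (q : Char → Bool) (c : Char) (b : Nat) (hb : 1 ≤ b) (t' : List Char)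
    (h : q c = true) : List.find? q (List.replicate b c ++ t') = some c := by
  obtain ⟨b', rfl⟩ : ∃ b', b = b' + 1 := ⟨b - 1, by omega⟩
  simp [List.replicate_succ, h]

theorem pv_find?_block_neg (q : Char → Bool) (c : Char) (b : Nat) (t' : List Char)
    (h : q c = false) : List.find? q (List.replicate b c ++ t') = List.find? q t' := by
  induction b with
  | zero => simp
  | succ b ih => simp [List.replicate_succ, h, ih]

-- all occurrences of c lie in positions [f, la]
theorem pv_count_extent (l : List Char) (c : Char) (f la : Nat)
    (hla : la < l.length) (hf : f ≤ la)
    (hlo : ∀ j (h : j < l.length), j < f → l[j] ≠ c)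
    (hhi : ∀ j (h : j < l.length), la < j → l[j] ≠ c) :
    l.count c = ((l.drop f).take (la + 1 - f)).count c := by
  have h1 : c ∉ l.take f := by
    intro hm
    obtain ⟨i, hi, hic⟩ := List.mem_iff_getElem.1 hm
    have hi' : i < f := by simp at hi; omega
    have hil : i < l.length := by omega
    exact hlo i hil hi' (by simpa [List.getElem_take] using hic)
  have h2 : c ∉ l.drop (la + 1) := by
    intro hm
    obtain ⟨i, hi, hic⟩ := List.mem_iff_getElem.1 hm
    have hil : la + 1 + i < l.length := by simp at hi; omega
    exact hhi (la + 1 + i) hil (by omega) (by simpa [List.getElem_drop] using hic)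
  have hd : (l.drop f).drop (la + 1 - f) = l.drop (la + 1) := by
    rw [List.drop_drop]; congr 1; omega
  calc l.count c = (l.take f).count c + (l.drop f).count c := by
        rw [← List.count_append, List.take_append_drop]
    _ = (l.drop f).count c := by rw [List.count_eq_zero.2 h1]; omega
    _ = ((l.drop f).take (la + 1 - f)).count c + ((l.drop f).drop (la + 1 - f)).count c := by
        rw [← List.count_append, List.take_append_drop]
    _ = ((l.drop f).take (la + 1 - f)).count c := by
        rw [hd, List.count_eq_zero.2 h2]; omega

-- B's per-character extent test holds exactly when A's block test holds at a maximal run of c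
theorem pv_bridge (p t' : List Char) (c : Char) (b : Nat) (hb : 1 ≤ b)
    (hp : ∀ d, p.getLast? = some d → d ≠ c) (ht : ∀ d, t'.head? = some d → d ≠ c) :
    (((p ++ (List.replicate b c ++ t')).count c : Int) = (b : Int) ↔
      pvStable (p ++ (List.replicate b c ++ t'))
        (p ++ (List.replicate b c ++ t')).reverse
        (p ++ (List.replicate b c ++ t')).length c = true) := by
  set L := p ++ (List.replicate b c ++ t') with hL
  have hn : L.length = p.length + b + t'.length := by simp [hL]; omega
  have hcount : L.count c = p.count c + b + t'.count c := by simp [hL, List.count_append]; omega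
  have hmem : c ∈ L := by
    refine List.mem_append_right _ (List.mem_append_left _ ?_)
    simp [List.mem_replicate]; omega
  obtain ⟨f, hf⟩ : ∃ f, PySem.List.index? L c = some f := by
    have := PySem.List.index?_isSome_iff (xs := L) (v := c)
    exact Option.isSome_iff_exists.1 (this.2 hmem)
  obtain ⟨r, hr⟩ : ∃ r, PySem.List.index? L.reverse c = some r := by
    have := PySem.List.index?_isSome_iff (xs := L.reverse) (v := c)
    exact Option.isSome_iff_exists.1 (this.2 (by simpa using hmem))
  obtain ⟨hfl, hfc, hfmin⟩ := PySem.List.getElem_of_index?_eq_some hf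
  obtain ⟨hrl, hrc, hrmin⟩ := PySem.List.getElem_of_index?_eq_some hr
  have hrl' : r < L.length := by simpa using hrl
  -- la := L.length - 1 - r is the last occurrence of c
  have hlac : L[L.length - 1 - r]'(by omega) = c := by
    have h' := hrc
    rw [List.getElem_reverse] at h'
    exact h'
  have hmax : ∀ j (h : j < L.length), L.length - 1 - r < j → L[j] ≠ c := by
    intro j hj hgt
    have hj' : L.length - 1 - j < r := by omega
    have := hrmin (L.length - 1 - j) (by omega)
    rw [List.getElem_reverse] at this
    have : L[L.length - 1 - (L.length - 1 - j)]'(by omega) ≠ c := this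
    simpa [Nat.sub_sub_self (by omega : j ≤ L.length - 1)] using this
  have hfle : f ≤ L.length - 1 - r := by
    by_contra hlt
    exact hmax f hfl (by omega) hfc
  have hstable : pvStable L L.reverse L.length c =
      (((L.length : Int) - 1 - (r : Int) - (f : Int) + 1) == (L.count c : Int)) := by
    have hf' : List.idxOf? c L = some f := by simpa using hf
    have hr' : List.idxOf? c L.reverse = some r := by simpa using hr
    simp [pvStable, hf', hr']
  constructor
  · -- count = b ⇒ extent test passes
    intro h
    have hcb : L.count c = b := by exact_mod_cast h
    have hp0 : c ∉ p := by
      intro hm; have := List.count_pos_iff.2 hm; omega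
    have ht0 : c ∉ t' := by
      intro hm; have := List.count_pos_iff.2 hm; omega
    have hfv : f = p.length := by
      have := pv_index?_mid p t' c b hb hp0
      rw [hL] at hf; rw [this] at hf; exact (Option.some_inj.1 hf).symm
    have hrevL : L.reverse = t'.reverse ++ (List.replicate b c ++ p.reverse) := by
      simp [hL, List.reverse_append]
    have hrv : r = t'.length := by
      have := pv_index?_mid t'.reverse p.reverse c b hb (by simpa using ht0)
      rw [hrevL] at hr; rw [this] at hr
      simpa using (Option.some_inj.1 hr).symm
    rw [hstable, beq_iff_eq, hfv, hrv, hcb, hn]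
    push_cast; ring
  · -- extent test passes ⇒ count = b
    intro h
    rw [hstable, beq_iff_eq] at h
    by_contra hne
    have hcb : L.count c ≠ b := fun he => hne (by exact_mod_cast he)
    -- a non-c element inside the extent
    have hmempt : c ∈ p ∨ c ∈ t' := by
      by_contra hcon
      rw [not_or] at hcon
      have h1 : p.count c = 0 := List.count_eq_zero.2 hcon.1
      have h2 : t'.count c = 0 := List.count_eq_zero.2 hcon.2
      omega
    have hgetp : ∀ j (hj : j < p.length), L[j]'(by omega) = p[j] := by
      intro j hj
      simp [hL, hj]
    have hrun : ∀ j (hj : j < b), L[p.length + j]'(by omega) = c := by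
      intro j hj
      simp [hL, hj]
    have hLple : p.length ≤ L.length - 1 - r := by
      by_contra h'
      exact hmax p.length (by omega) (by omega) (by simpa using hrun 0 (by omega))
    have hwit : ∃ j₀, ∃ (h₀ : j₀ < L.length), f ≤ j₀ ∧ j₀ ≤ L.length - 1 - r ∧ L[j₀] ≠ c := by
      rcases hmempt with hcp | hct
      · obtain ⟨jp, hjp, hjpc⟩ := List.mem_iff_getElem.1 hcp
        have hpne : p.length ≠ 0 := by intro h'; omega
        have hlast : p[p.length - 1]'(by omega) ≠ c := by
          apply hp
          rw [List.getLast?_eq_getElem?, List.getElem?_eq_getElem (by omega)]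
        have hjlt : jp < p.length - 1 := by
          by_contra h'
          have hje : jp = p.length - 1 := by omega
          subst hje
          exact hlast hjpc
        have hfj : f ≤ jp := by
          by_contra h'
          exact hfmin jp (by omega) (by rw [hgetp jp hjp]; exact hjpc)
        exact ⟨p.length - 1, by omega, by omega, by omega,
          by rw [hgetp (p.length - 1) (by omega)]; exact hlast⟩
      · obtain ⟨jt, hjt, hjtc⟩ := List.mem_iff_getElem.1 hct
        have hgett : ∀ j (hj : j < t'.length), L[p.length + b + j]'(by omega) = t'[j] := by
          intro j hj
          show (p ++ (List.replicate b c ++ t'))[p.length + b + j]'(by simp; omega) = t'[j]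
          rw [List.getElem_append_right (by omega), List.getElem_append_right (by simp [List.length_replicate]; omega)]
          congr 1
          simp
          omega
        have hhead : t'[0]'(by omega) ≠ c := by
          apply ht
          rw [List.head?_eq_getElem?, List.getElem?_eq_getElem (by omega)]
        have hfp : f ≤ p.length := by
          by_contra h'
          exact hfmin p.length (by omega) (by simpa using hrun 0 (by omega))
        have hla' : p.length + b + jt ≤ L.length - 1 - r := by
          by_contra h'
          exact hmax (p.length + b + jt) (by omega) (by omega) (by rw [hgett jt hjt]; exact hjtc)
        exact ⟨p.length + b, by omega, by omega, by omega,
          by have := hgett 0 (by omega); simp at this; rw [this]; exact hhead⟩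
    obtain ⟨j₀, h₀, hj₀f, hj₀la, hj₀c⟩ := hwit
    set la := L.length - 1 - r with hla
    have hcext : L.count c = ((L.drop f).take (la + 1 - f)).count c :=
      pv_count_extent L c f la (by omega) hfle (fun j hj hlt => hfmin j hlt) hmax
    have hmlen : ((L.drop f).take (la + 1 - f)).length = la + 1 - f := by
      simp; omega
    have hmid : ((L.drop f).take (la + 1 - f))[j₀ - f]'(by omega) ≠ c := by
      rw [List.getElem_take, List.getElem_drop]
      have : f + (j₀ - f) = j₀ := by omega
      simp_rw [this]; exact hj₀c
    have hlt : L.count c < la + 1 - f := by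
      rcases Nat.lt_or_ge (L.count c) (la + 1 - f) with h' | h'
      · exact h'
      · exfalso
        have hle : ((L.drop f).take (la + 1 - f)).count c ≤ la + 1 - f :=
          le_of_le_of_eq List.count_le_length hmlen
        have heq : ((L.drop f).take (la + 1 - f)).count c = ((L.drop f).take (la + 1 - f)).length := by omega
        have hall := List.count_eq_length.1 heq
        exact hmid (hall _ (List.getElem_mem (by omega))).symm
    omega

-- dict.fromkeys scans the distinct characters in first-occurrence order; since the test
-- depends only on the character, find? over the dedup equals find? over the full list
theorem pv_foldl_add_prefix (l acc : List Char) :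
    ∃ rest, List.foldl PySem.Set.add acc l = acc ++ rest := by
  induction l generalizing acc with
  | nil => exact ⟨[], by simp⟩
  | cons x l' ih =>
    rw [List.foldl_cons]
    obtain ⟨r, hr⟩ := ih (PySem.Set.add acc x)
    by_cases hx : PySem.Set.contains acc x = true
    · refine ⟨r, ?_⟩
      rw [hr]
      simp only [PySem.Set.add, if_pos hx]
    · refine ⟨[x] ++ r, ?_⟩
      rw [hr]
      simp only [PySem.Set.add, if_neg hx, List.append_assoc]

theorem pv_find?_foldl_add (p : Char → Bool) (l : List Char) :
    ∀ acc : List Char, (∀ x ∈ acc, p x = false) →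
      List.find? p (List.foldl PySem.Set.add acc l) = List.find? p l := by
  induction l with
  | nil =>
    intro acc hacc
    have hnone : List.find? p acc = none :=
      List.find?_eq_none.2 (fun x hx => by simp [hacc x hx])
    simp [hnone]
  | cons x l' ih =>
    intro acc hacc
    rw [List.foldl_cons]
    by_cases hpx : p x = true
    · have hxacc : ¬ PySem.Set.contains acc x = true := by
        intro hc
        have : x ∈ acc := by simpa [PySem.Set.contains] using hc
        simp [hacc x this] at hpx
      rw [show PySem.Set.add acc x = acc ++ [x] by simp only [PySem.Set.add, if_neg hxacc]]
      obtain ⟨r, hr⟩ := pv_foldl_add_prefix l' (acc ++ [x])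
      have hnone : List.find? p acc = none :=
        List.find?_eq_none.2 (fun y hy => by simp [hacc y hy])
      rw [hr, List.append_assoc, List.find?_append, hnone]
      simp [List.find?, hpx]
    · have hpx' : p x = false := by simpa using hpx
      have hacc' : ∀ y ∈ PySem.Set.add acc x, p y = false := by
        intro y hy
        rcases (PySem.Set.mem_add acc x y).1 hy with h | h
        · exact hacc y h
        · subst h; exact hpx'
      rw [ih _ hacc']
      simp [List.find?, hpx']

theorem pv_find?_dedup (p : Char → Bool) (l : List Char) :
    List.find? p (PySem.List.dedup l) = List.find? p l := by
  rw [PySem.List.dedup, PySem.Set.ofList]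
  exact pv_find?_foldl_add p l PySem.Set.empty (by intro x hx; simp [PySem.Set.empty] at hx)

-- A's outer loop over any suffix t of l (p its prefix, runs never straddling the boundary)
-- returns the first character of t passing B's test
theorem pvLoopA_eq_find? (l : List Char) :
    ∀ (N : Nat) (t p : List Char), t.length ≤ N → l = p ++ t →
      (∀ d, t.head? = some d → p.getLast? ≠ some d) →
      pvLoopA (PySem.Dict.counter l) t = t.find? (pvStable l l.reverse l.length) := by
  intro N
  induction N with
  | zero =>
    intro t p hlen _ _
    have ht : t = [] := by cases t <;> simp_all
    subst ht
    rw [pvLoopA]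
    simp
  | succ N ih =>
    intro t p hlen hlp hbound
    match t with
    | [] => rw [pvLoopA]; simp
    | c :: rest =>
      have hb1 : 1 ≤ pvBlockLen c (c :: rest) := by simp [pvBlockLen]
      set b := pvBlockLen c (c :: rest) with hbdef
      have hble : b ≤ rest.length + 1 := by
        simpa using pvBlockLen_le c (c :: rest)
      have hsplit : c :: rest = List.replicate b c ++ (c :: rest).drop b := by
        conv_lhs => rw [← List.take_append_drop b (c :: rest)]
        rw [hbdef, pvBlockLen_take]
      set t2 := (c :: rest).drop b with ht2
      have hhead2 : ∀ d, t2.head? = some d → d ≠ c := fun d hd =>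
        pvBlockLen_drop_head c d (c :: rest) (by rw [← hbdef]; exact hd)
      have hl2' : l = (p ++ List.replicate b c) ++ t2 := by
        rw [hlp]
        conv_lhs => rw [hsplit]
        rw [List.append_assoc]
      have hl2 : l = p ++ (List.replicate b c ++ t2) := by
        rw [hl2', List.append_assoc]
      have hplast : ∀ d, p.getLast? = some d → d ≠ c := by
        intro d hd hdc
        subst hdc
        exact hbound d rfl hd
      have hbridge := pv_bridge p t2 c b hb1 hplast hhead2
      rw [← hl2] at hbridge
      have hcget : (PySem.Dict.counter l).getD c 0 = (l.count c : Int) :=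
        PySem.Dict.getD_counter l c
      rw [pvLoopA]
      simp only [← hbdef, hcget, ← ht2]
      by_cases hc : (l.count c : Int) = (b : Int)
      · rw [if_pos hc]
        have hstab := hbridge.1 hc
        conv_rhs => rw [hsplit]
        rw [pv_find?_block_pos _ c b hb1 t2 hstab]
      · rw [if_neg hc]
        have hstab : pvStable l l.reverse l.length c = false := by
          cases hsb : pvStable l l.reverse l.length c
          · rfl
          · exact absurd (hbridge.2 hsb) hc
        conv_rhs => rw [hsplit]
        rw [pv_find?_block_neg _ c b t2 hstab]
        have hlen2 : t2.length ≤ N := by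
          have hlen' : rest.length + 1 ≤ N + 1 := by simpa using hlen
          rw [ht2]
          simp only [List.length_drop, List.length_cons]
          omega
        have hlast2 : ∀ d, t2.head? = some d → (p ++ List.replicate b c).getLast? ≠ some d := by
          intro d hd hcon
          have he : p ++ List.replicate b c = (p ++ List.replicate (b - 1) c) ++ [c] := by
            conv_lhs => rw [show b = (b - 1) + 1 by omega]
            rw [List.replicate_succ', ← List.append_assoc]
          rw [he, List.getLast?_concat] at hcon
          exact hhead2 d hd (by injection hcon with h'; exact h'.symm)
        exact ih t2 (p ++ List.replicate b c) hlen2 hl2' hlast2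

theorem first_stable_character_core (s : String) :
    first_stable_character s = first_stable_character_alt s := by
  unfold first_stable_character first_stable_character_alt
  cases hsl : s.toList with
  | nil => simp
  | cons c rest =>
    simp only [List.isEmpty_cons]
    rw [PySem.Dict.foldl_insert_getD_add_one_eq_counter]
    rw [pvLoopA_eq_find? (c :: rest) (c :: rest).length (c :: rest) [] le_rfl rfl
      (by simp)]
    rw [pv_find?_dedup (pvStable (c :: rest) (c :: rest).reverse (c :: rest).length) (c :: rest)]
    rfl

-- ===== VERDICT (by name: the statement is the Claim_ definition above) =====
theorem first_stable_character_spec : Claim_equal_first_stable_character := by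
  intro s _
  exact first_stable_character_core s
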